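-- pv_equiv track=rewrite | github.com/dlystyr/fpl-mcpserver | src/fpl_mcp/server.py | _current_event_id
-- ===== SOURCE A (Python) =====
-- from typing import Any, Literal
--
-- def _current_event_id(events: list[dict[str, Any]]) -> int | None:
--     cur = next((e for e in events if e.get("is_current")), None)
--     if cur:
--         return int(cur["id"])
--     nxt = next((e for e in events if e.get("is_next")), None)
--     if nxt:
--         return int(nxt["id"])
--     return None
-- ===== SOURCE B (Python) =====
-- def _current_event_id(events):
--     first_current = None
--     first_next = None
--     for e in events:
--         if first_current is None and e.get("is_current"):
--             first_current = e
--         if first_next is None and e.get("is_next"):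
--             first_next = e
--     if first_current is not None:
--         return int(first_current["id"])
--     if first_next is not None:
--         return int(first_next["id"])
--     return None
-- ===== Notes on version B (the rewrite author's own statement) =====
-- stated objective: alternative
-- what changed: Replaced A's two sequential generator scans with a single pass that maintains two first-match slots (first_current, first_next) and decides after the loop.
import Mathlib
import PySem

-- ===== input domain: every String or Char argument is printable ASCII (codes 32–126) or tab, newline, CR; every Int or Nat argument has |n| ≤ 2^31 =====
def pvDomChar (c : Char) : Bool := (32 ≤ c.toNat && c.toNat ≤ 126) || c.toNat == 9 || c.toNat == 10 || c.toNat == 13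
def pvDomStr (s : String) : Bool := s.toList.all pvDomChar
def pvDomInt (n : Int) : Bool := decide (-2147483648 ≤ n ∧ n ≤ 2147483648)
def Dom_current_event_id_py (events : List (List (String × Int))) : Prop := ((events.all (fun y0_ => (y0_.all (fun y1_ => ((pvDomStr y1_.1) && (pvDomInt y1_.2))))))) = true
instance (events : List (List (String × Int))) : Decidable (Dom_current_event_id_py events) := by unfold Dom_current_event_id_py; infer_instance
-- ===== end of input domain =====

-- B replaces A's two sequential scans with one loop holding two first-match slots; equivalence proved on Pre_ (where Python A returns).

-- e.get(k): first-match lookup in the assoc list (Python dict lookup)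
def pvGet? (e : List (String × Int)) (k : String) : Option Int :=
  (e.find? (fun p => p.1 == k)).map (fun p => p.2)

-- truthiness of e.get(k): present and nonzero
def pvTruthy (o : Option Int) : Bool := match o with | some v => v != 0 | none => false

-- ===== PORT A =====
-- cur = next((e for e in events if e.get("is_current")), None); if cur: return int(cur["id"]); same for is_next; return None.
-- 'if cur:' is dict truthiness: not None and nonempty.
def pvDictTruthy (o : Option (List (String × Int))) : Bool :=
  match o with | some d => !d.isEmpty | none => false

def current_event_id_py (events : List (List (String × Int))) : Option Int :=
  let cur := events.find? (fun e => pvTruthy (pvGet? e "is_current"))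
  if pvDictTruthy cur then
    pvGet? (cur.getD []) "id"     -- none here = Python KeyError, excluded by Pre_
  else
    let nxt := events.find? (fun e => pvTruthy (pvGet? e "is_next"))
    if pvDictTruthy nxt then
      pvGet? (nxt.getD []) "id"   -- none here = Python KeyError, excluded by Pre_
    else
      none

-- ===== PORT B =====
-- single pass, two slots each assigned only the first time a matching event is seen
def current_event_id_py_alt (events : List (List (String × Int))) : Option Int :=
  let st := events.foldl
    (fun (st : Option (List (String × Int)) × Option (List (String × Int))) e =>
      let fc := if st.1.isNone && pvTruthy (pvGet? e "is_current") then some e else st.1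
      let fn := if st.2.isNone && pvTruthy (pvGet? e "is_next") then some e else st.2
      (fc, fn))
    (none, none)
  match st.1 with
  | some c => pvGet? c "id"       -- none here = Python KeyError, excluded by Pre_
  | none =>
    match st.2 with
    | some n => pvGet? n "id"     -- none here = Python KeyError, excluded by Pre_
    | none => none

-- ===== PRECONDITION & SPEC =====
-- Pre_ excludes exactly the inputs where Python A raises KeyError: the first event flagged is_current
-- (or, lacking one, the first event flagged is_next) has no "id" key. B raises KeyError there too.
def Pre_current_event_id_py (events : List (List (String × Int))) : Prop :=
  (match events.find? (fun e => pvTruthy (pvGet? e "is_current")) with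
   | some c => c.any (fun kv => kv.1 == "id")
   | none =>
     match events.find? (fun e => pvTruthy (pvGet? e "is_next")) with
     | some n => n.any (fun kv => kv.1 == "id")
     | none => true) = true
instance (events : List (List (String × Int))) : Decidable (Pre_current_event_id_py events) := by
  unfold Pre_current_event_id_py; infer_instance

def pvWitness_current_event_id_py : (List (List (String × Int))) := [[("is_current", 1), ("id", 5)]]

def Spec_current_event_id_py (events : List (List (String × Int))) (out : Option Int) : Prop := out = current_event_id_py_alt events
instance (events : List (List (String × Int))) (out : Option Int) : Decidable (Spec_current_event_id_py events out) := by unfold Spec_current_event_id_py; infer_instance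

-- ===== CLAIM (what is proved, stated in full; the proofs are below) =====
def Claim_equal_current_event_id_py : Prop := ∀ (events : List (List (String × Int))), Dom_current_event_id_py events → Pre_current_event_id_py events → Spec_current_event_id_py events (current_event_id_py events)

-- ===== LEMMAS AND PROOFS =====

-- B's fold with two never-overwritten slots computes the two first matches.
theorem pv_fold_slots (events : List (List (String × Int)))
    (sc sn : Option (List (String × Int))) :
    events.foldl
      (fun (st : Option (List (String × Int)) × Option (List (String × Int))) e =>
        let fc := if st.1.isNone && pvTruthy (pvGet? e "is_current") then some e else st.1
        let fn := if st.2.isNone && pvTruthy (pvGet? e "is_next") then some e else st.2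
        (fc, fn))
      (sc, sn)
    = (sc.or (events.find? (fun e => pvTruthy (pvGet? e "is_current"))),
       sn.or (events.find? (fun e => pvTruthy (pvGet? e "is_next")))) := by
  induction events generalizing sc sn with
  | nil => simp
  | cons e es ih =>
    simp only [List.foldl_cons, List.find?]
    rw [ih]
    cases sc <;> cases sn <;>
      cases hc : pvTruthy (pvGet? e "is_current") <;>
      cases hn : pvTruthy (pvGet? e "is_next") <;>
      simp [hc, hn]

-- an event matched by the is_current/is_next predicate is a nonempty dict
theorem pv_truthy_nonempty (e : List (String × Int)) (k : String)
    (h : pvTruthy (pvGet? e k) = true) : e.isEmpty = false := by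
  cases e with
  | nil => simp [pvTruthy, pvGet?] at h
  | cons kv t => simp [List.isEmpty]

-- ===== VERDICT (by name: the statement is the Claim_ definition above) =====
theorem current_event_id_py_spec : Claim_equal_current_event_id_py := by
  intro events _ _
  unfold Spec_current_event_id_py current_event_id_py current_event_id_py_alt
  rw [pv_fold_slots]
  cases hc : events.find? (fun e => pvTruthy (pvGet? e "is_current")) with
  | some c =>
    have := pv_truthy_nonempty c "is_current" (by
      have := List.find?_some hc; simpa using this)
    simp [pvDictTruthy, this]
  | none =>
    cases hn : events.find? (fun e => pvTruthy (pvGet? e "is_next")) with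
    | some n =>
      have := pv_truthy_nonempty n "is_next" (by
        have := List.find?_some hn; simpa using this)
      simp [pvDictTruthy, this]
    | none => simp [pvDictTruthy]
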